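-- pv_equiv track=rewrite | github.com/olsenw/LeetCodeExercises | Python3/maximum_fruits_harvested_after_at_most_k_steps.py | maxTotalFruits_fails2
-- ===== SOURCE A (Python) =====
-- import bisect
-- from typing import List, Dict, Set, Optional
--
-- def maxTotalFruits_fails2(fruits: List[List[int]], startPos: int, k: int) -> int:
--     answer = 0
--     values = [0]
--     for i in range(len(fruits)):
--         values.append(values[-1] + fruits[i][1])
--     # go left then go right
--     startIndex = bisect.bisect(fruits, [startPos, 10**5])
--     fruitIndex = bisect.bisect(fruits, [startPos - k, 0])
--     for i in range(fruitIndex, startIndex):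
--         distance = fruits[i][0] + (k - (startPos - fruits[i][0]))
--         distance = max(distance, startPos)
--         j = bisect.bisect(fruits, [distance, 10**5], i)
--         # j = min(j, len(values) - 1)
--         answer = max(answer, values[j] - values[i])
--     # go right then go left
--     fruitIndex = bisect.bisect(fruits, [startPos + k, 10**5])
--     for i in range(startIndex, fruitIndex):
--         distance = fruits[i][0] - (k - (fruits[i][0] - startPos))
--         distance = min(distance, startPos)
--         j = bisect.bisect(fruits, [distance,0], 0, i)
--         answer = max(answer, values[i] - values[j])
--     return answer
-- ===== SOURCE B (Python) =====
-- import bisect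
--
-- def maxTotalFruits_fails2(fruits, startPos, k):
--     # Same bisect-delimited windows, but no prefix-sum table: each window's
--     # total is summed directly from the slice, and the running-max loops are
--     # replaced by comprehensions fed to a single max().
--     start = bisect.bisect(fruits, [startPos, 10**5])
--     lo = bisect.bisect(fruits, [startPos - k, 0])
--     hi = bisect.bisect(fruits, [startPos + k, 10**5])
--     going_left = [
--         sum(f[1] for f in fruits[i:bisect.bisect(
--             fruits, [max(2 * fruits[i][0] + k - startPos, startPos), 10**5], i)])
--         for i in range(lo, start)
--     ]
--     going_right = [
--         sum(f[1] for f in fruits[bisect.bisect(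
--             fruits, [min(2 * fruits[i][0] - k - startPos, startPos), 0], 0, i):i])
--         for i in range(start, hi)
--     ]
--     return max([0] + going_left + going_right)
-- ===== Notes on version B (the rewrite author's own statement) =====
-- stated objective: simpler
-- what changed: B drops A's prefix-sum table and sums each candidate window directly from its slice, and replaces A's two running-maximum accumulator loops by list comprehensions reduced with a single max([0]+...); the bisect window computation is kept, since it fixes A's exact value on every input (sorted or not).
import Mathlib
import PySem

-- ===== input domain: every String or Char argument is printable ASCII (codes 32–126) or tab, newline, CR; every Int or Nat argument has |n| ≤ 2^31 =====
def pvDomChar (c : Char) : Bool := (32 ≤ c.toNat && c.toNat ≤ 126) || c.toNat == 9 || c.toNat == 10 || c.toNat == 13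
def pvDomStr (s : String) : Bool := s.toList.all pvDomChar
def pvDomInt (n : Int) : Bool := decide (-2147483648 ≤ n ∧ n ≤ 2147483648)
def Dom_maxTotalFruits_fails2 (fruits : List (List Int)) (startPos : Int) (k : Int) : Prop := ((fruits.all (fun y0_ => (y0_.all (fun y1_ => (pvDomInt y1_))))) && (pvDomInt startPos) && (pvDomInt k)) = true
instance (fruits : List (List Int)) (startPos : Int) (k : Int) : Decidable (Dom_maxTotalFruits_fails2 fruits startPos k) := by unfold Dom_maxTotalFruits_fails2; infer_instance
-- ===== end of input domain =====

-- B drops A's prefix-sum table (each candidate window is summed directly from its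
-- slice) and replaces the running-maximum loops by comprehensions reduced with one
-- max(); the bisect window computation itself is kept (it fixes A's exact value).


-- ===== PORT A =====
-- Literal transliteration of A.  bisect.bisect is PySem.List.bisectRight (Python's
-- list order is Lean's List `<`); bisect.bisect(a, x, lo) is lo + bisectRight on
-- a[lo:], and bisect.bisect(a, x, 0, hi) is bisectRight on a[:hi] (exact for every
-- list: the probed midpoints correspond one to one).  The loop indices produced by
-- range are nonnegative, so `i.toNat` is exact there.
def maxTotalFruits_fails2 (fruits : List (List Int)) (startPos : Int) (k : Int) : Int :=
  let values : List Int :=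
    (PySem.List.pyRange 0 (PySem.List.len fruits)).foldl
      (fun values i =>
        values ++ [PySem.List.pyGetD values (-1) 0
                    + PySem.List.pyGetD (PySem.List.pyGetD fruits i []) 1 0]) [0]
  let startIndex : Nat := PySem.List.bisectRight fruits [startPos, 100000]
  let fruitIndex : Nat := PySem.List.bisectRight fruits [startPos - k, 0]
  let answer : Int :=
    (PySem.List.pyRange (fruitIndex : Int) (startIndex : Int)).foldl
      (fun answer i =>
        let d1 := PySem.List.pyGetD (PySem.List.pyGetD fruits i []) 0 0
                    + (k - (startPos - PySem.List.pyGetD (PySem.List.pyGetD fruits i []) 0 0))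
        let d := max d1 startPos
        let j : Nat := i.toNat + PySem.List.bisectRight (fruits.drop i.toNat) [d, 100000]
        max answer (PySem.List.pyGetD values (j : Int) 0 - PySem.List.pyGetD values i 0)) 0
  let fruitIndex2 : Nat := PySem.List.bisectRight fruits [startPos + k, 100000]
  (PySem.List.pyRange (startIndex : Int) (fruitIndex2 : Int)).foldl
      (fun answer i =>
        let d1 := PySem.List.pyGetD (PySem.List.pyGetD fruits i []) 0 0
                    - (k - (PySem.List.pyGetD (PySem.List.pyGetD fruits i []) 0 0 - startPos))
        let d := min d1 startPos
        let j : Nat := PySem.List.bisectRight (fruits.take i.toNat) [d, 0]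
        max answer (PySem.List.pyGetD values i 0 - PySem.List.pyGetD values (j : Int) 0)) answer

-- ===== PORT B =====
-- Literal transliteration of Source B (same bisect primitives; 'sum(f[1] for f in
-- fruits[i:j])' is the sum of the mapped slice; 'max([0] + l1 + l2)' is
-- PySem.List.max? of the nonempty concatenation).
def maxTotalFruits_fails2_alt (fruits : List (List Int)) (startPos : Int) (k : Int) : Int :=
  let start : Nat := PySem.List.bisectRight fruits [startPos, 100000]
  let lo : Nat := PySem.List.bisectRight fruits [startPos - k, 0]
  let hi : Nat := PySem.List.bisectRight fruits [startPos + k, 100000]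
  let goingLeft : List Int :=
    (PySem.List.pyRange (lo : Int) (start : Int)).map (fun i =>
      ((PySem.List.slice fruits (some i)
          (some ((i.toNat + PySem.List.bisectRight (fruits.drop i.toNat)
                    [max (2 * PySem.List.pyGetD (PySem.List.pyGetD fruits i []) 0 0 + k - startPos) startPos,
                     100000] : Nat) : Int))).map
        (fun f => PySem.List.pyGetD f 1 0)).sum)
  let goingRight : List Int :=
    (PySem.List.pyRange (start : Int) (hi : Int)).map (fun i =>
      ((PySem.List.slice fruits
          (some ((PySem.List.bisectRight (fruits.take i.toNat)
                    [min (2 * PySem.List.pyGetD (PySem.List.pyGetD fruits i []) 0 0 - k - startPos) startPos,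
                     0] : Nat) : Int))
          (some i)).map
        (fun f => PySem.List.pyGetD f 1 0)).sum)
  (PySem.List.max? ((0 : Int) :: (goingLeft ++ goingRight)) (fun x => x)).getD 0

-- ===== PRECONDITION & SPEC =====
-- Pre_ excludes exactly the inputs on which A raises: whenever some row has fewer
-- than two entries, A's prefix-sum loop hits fruits[i][1] and raises IndexError.
def Pre_maxTotalFruits_fails2 (fruits : List (List Int)) (startPos : Int) (k : Int) : Prop :=
  ∀ f ∈ fruits, 2 ≤ f.length

instance (fruits : List (List Int)) (startPos : Int) (k : Int) : Decidable (Pre_maxTotalFruits_fails2 fruits startPos k) := by unfold Pre_maxTotalFruits_fails2; infer_instance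

def pvWitness_maxTotalFruits_fails2 : List (List Int) × Int × Int := ([[0, 1], [2, 3], [5, 2]], 4, 3)

def Spec_maxTotalFruits_fails2 (fruits : List (List Int)) (startPos : Int) (k : Int) (out : Int) : Prop := out = maxTotalFruits_fails2_alt fruits startPos k
instance (fruits : List (List Int)) (startPos : Int) (k : Int) (out : Int) : Decidable (Spec_maxTotalFruits_fails2 fruits startPos k out) := by unfold Spec_maxTotalFruits_fails2; infer_instance

-- ===== CLAIM (what is proved, stated in full; the proofs are below) =====
def Claim_equal_maxTotalFruits_fails2 : Prop := ∀ (fruits : List (List Int)) (startPos : Int) (k : Int), Dom_maxTotalFruits_fails2 fruits startPos k → Pre_maxTotalFruits_fails2 fruits startPos k → Spec_maxTotalFruits_fails2 fruits startPos k (maxTotalFruits_fails2 fruits startPos k)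

-- ===== LEMMAS AND PROOFS =====

-- prefix sums of the amounts, and the list A's first loop builds
def pvSum (fruits : List (List Int)) (m : Nat) : Int :=
  ((fruits.take m).map (fun f => PySem.List.pyGetD f 1 0)).sum
def pvPref (fruits : List (List Int)) : List Int := (List.range (fruits.length + 1)).map (pvSum fruits)

theorem pvSum_snoc (xs : List (List Int)) (f : List Int) :
    pvSum (xs ++ [f]) (xs.length + 1) = pvSum xs xs.length + PySem.List.pyGetD f 1 0 := by
  unfold pvSum
  rw [List.take_append, List.take_of_length_le (by omega), List.take_length]
  simp

theorem pvPref_append (xs : List (List Int)) (f : List Int) :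
    pvPref (xs ++ [f]) = pvPref xs ++ [pvSum xs xs.length + PySem.List.pyGetD f 1 0] := by
  unfold pvPref
  have hlen : (xs ++ [f]).length + 1 = (xs.length + 1) + 1 := by simp
  rw [hlen, List.range_succ, List.map_append]
  congr 1
  · refine List.map_congr_left ?_
    intro m hm
    have hm' : m ≤ xs.length := by
      have := List.mem_range.mp hm
      omega
    unfold pvSum
    rw [List.take_append, Nat.sub_eq_zero_of_le hm', List.take_zero, List.append_nil]
  · rw [List.map_cons, List.map_nil, pvSum_snoc]

theorem pvValuesA_eq (xs : List (List Int)) :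
    xs.foldl (fun vs f => vs ++ [PySem.List.pyGetD vs (-1) 0 + PySem.List.pyGetD f 1 0]) [0]
      = pvPref xs := by
  induction xs using List.reverseRecOn with
  | nil => rfl
  | append_singleton xs f ih =>
    rw [List.foldl_append, List.foldl_cons, List.foldl_nil, ih, pvPref_append]
    have hsplit : pvPref xs = (List.range xs.length).map (pvSum xs) ++ [pvSum xs xs.length] := by
      rw [pvPref, List.range_succ, List.map_append]
      rfl
    rw [hsplit, PySem.List.pyGetD_neg_one_append_singleton]

theorem pvPref_get (xs : List (List Int)) (i : Int) (h0 : 0 ≤ i) (h1 : i ≤ (xs.length : Int)) :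
    PySem.List.pyGetD (pvPref xs) i 0 = pvSum xs i.toNat := by
  unfold pvPref
  rw [PySem.List.pyGetD_eq_getElem _ _ h0 (by simp; omega)]
  rw [List.getElem_map, List.getElem_range]

-- a window's total, summed from the slice, is the difference of two prefix sums
theorem pvSum_window (xs : List (List Int)) (i m : Nat) :
    (((xs.drop i).take m).map (fun f => PySem.List.pyGetD f 1 0)).sum
      = pvSum xs (i + m) - pvSum xs i := by
  unfold pvSum
  rw [List.take_add, List.map_append, List.sum_append]
  omega

-- the bisection loop stays between its bounds on EVERY list (no sortedness)
theorem pvBisectLoop_bounds (xs : List (List Int)) (q : List Int) :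
    ∀ (fuel lo hi : Nat), lo ≤ hi →
      lo ≤ PySem.List.bisectRightLoop xs q fuel lo hi
        ∧ PySem.List.bisectRightLoop xs q fuel lo hi ≤ hi := by
  intro fuel
  induction fuel with
  | zero =>
    intro lo hi hlh
    rw [PySem.List.bisectRightLoop.eq_def]
    simp [hlh]
  | succ fuel ih =>
    intro lo hi hlh
    rw [PySem.List.bisectRightLoop.eq_def]
    simp only []
    by_cases h : lo < hi
    · simp only [if_pos h]
      cases hx : xs[(lo + hi) / 2]? with
      | none => simp [hlh]
      | some y =>
        simp only []
        by_cases hq : q < y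
        · simp only [if_pos hq]
          have := ih lo ((lo + hi) / 2) (by omega)
          omega
        · simp only [if_neg hq]
          have := ih ((lo + hi) / 2 + 1) hi (by omega)
          omega
    · simp [if_neg h, hlh]

theorem pvBisect_le_length (xs : List (List Int)) (q : List Int) :
    PySem.List.bisectRight xs q ≤ xs.length := by
  unfold PySem.List.bisectRight
  exact (pvBisectLoop_bounds xs q xs.length 0 xs.length (Nat.zero_le _)).2

-- the common canonical value: both sweeps with every candidate written as a
-- difference of prefix sums
def pvCanon (fruits : List (List Int)) (startPos k : Int) : Int :=
  let a1 :=
    (PySem.List.pyRange (PySem.List.bisectRight fruits [startPos - k, 0] : Int)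
        (PySem.List.bisectRight fruits [startPos, 100000] : Int)).foldl
      (fun ans i =>
        max ans (pvSum fruits (i.toNat + PySem.List.bisectRight (fruits.drop i.toNat)
                    [max (2 * PySem.List.pyGetD (PySem.List.pyGetD fruits i []) 0 0 + k - startPos) startPos,
                     100000])
                  - pvSum fruits i.toNat)) 0
  (PySem.List.pyRange (PySem.List.bisectRight fruits [startPos, 100000] : Int)
      (PySem.List.bisectRight fruits [startPos + k, 100000] : Int)).foldl
      (fun ans i =>
        max ans (pvSum fruits i.toNat
                  - pvSum fruits (PySem.List.bisectRight (fruits.take i.toNat)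
                      [min (2 * PySem.List.pyGetD (PySem.List.pyGetD fruits i []) 0 0 - k - startPos) startPos,
                       0]))) a1

theorem pvA_eq_canon (fruits : List (List Int)) (startPos k : Int) :
    maxTotalFruits_fails2 fruits startPos k = pvCanon fruits startPos k := by
  simp only [maxTotalFruits_fails2]
  rw [PySem.List.foldl_pyRange_zero_pyGetD fruits ([] : List Int)
      (fun vs f => vs ++ [PySem.List.pyGetD vs (-1) 0 + PySem.List.pyGetD f 1 0]) [0]]
  rw [pvValuesA_eq]
  simp only [pvCanon]
  rw [PySem.List.foldl_congr_mem _ _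
    (fun ans i =>
      max ans (pvSum fruits (i.toNat + PySem.List.bisectRight (fruits.drop i.toNat)
                  [max (2 * PySem.List.pyGetD (PySem.List.pyGetD fruits i []) 0 0 + k - startPos) startPos,
                   100000])
                - pvSum fruits i.toNat)) 0 ?hca]
  case hca =>
    intro acc i hi
    obtain ⟨hli, his⟩ := PySem.List.mem_pyRange_one.mp hi
    have h0i : 0 ≤ i := le_trans (Int.natCast_nonneg _) hli
    have hsn : (PySem.List.bisectRight fruits [startPos, 100000] : Int) ≤ (fruits.length : Int) := by
      exact_mod_cast pvBisect_le_length fruits [startPos, 100000]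
    have harith : max (PySem.List.pyGetD (PySem.List.pyGetD fruits i []) 0 0
          + (k - (startPos - PySem.List.pyGetD (PySem.List.pyGetD fruits i []) 0 0))) startPos
        = max (2 * PySem.List.pyGetD (PySem.List.pyGetD fruits i []) 0 0 + k - startPos) startPos := by
      omega
    rw [harith]
    have hbd : PySem.List.bisectRight (fruits.drop i.toNat)
        [max (2 * PySem.List.pyGetD (PySem.List.pyGetD fruits i []) 0 0 + k - startPos) startPos, 100000]
        ≤ (fruits.drop i.toNat).length := pvBisect_le_length _ _
    rw [List.length_drop] at hbd
    congr 1
    rw [pvPref_get fruits _ (Int.natCast_nonneg _) (by exact_mod_cast (by omega :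
          i.toNat + PySem.List.bisectRight (fruits.drop i.toNat)
            [max (2 * PySem.List.pyGetD (PySem.List.pyGetD fruits i []) 0 0 + k - startPos) startPos, 100000]
            ≤ fruits.length)),
        pvPref_get fruits i h0i (by omega)]
    congr 2
  rw [PySem.List.foldl_congr_mem _ _
    (fun ans i =>
      max ans (pvSum fruits i.toNat
                - pvSum fruits (PySem.List.bisectRight (fruits.take i.toNat)
                    [min (2 * PySem.List.pyGetD (PySem.List.pyGetD fruits i []) 0 0 - k - startPos) startPos,
                     0]))) _ ?hcb]
  case hcb =>
    intro acc i hi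
    obtain ⟨hli, his⟩ := PySem.List.mem_pyRange_one.mp hi
    have h0i : 0 ≤ i := le_trans (Int.natCast_nonneg _) hli
    have hrn : (PySem.List.bisectRight fruits [startPos + k, 100000] : Int) ≤ (fruits.length : Int) := by
      exact_mod_cast pvBisect_le_length fruits [startPos + k, 100000]
    have harith : min (PySem.List.pyGetD (PySem.List.pyGetD fruits i []) 0 0
          - (k - (PySem.List.pyGetD (PySem.List.pyGetD fruits i []) 0 0 - startPos))) startPos
        = min (2 * PySem.List.pyGetD (PySem.List.pyGetD fruits i []) 0 0 - k - startPos) startPos := by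
      omega
    rw [harith]
    have hbt : PySem.List.bisectRight (fruits.take i.toNat)
        [min (2 * PySem.List.pyGetD (PySem.List.pyGetD fruits i []) 0 0 - k - startPos) startPos, 0]
        ≤ (fruits.take i.toNat).length := pvBisect_le_length _ _
    rw [List.length_take] at hbt
    congr 1
    rw [pvPref_get fruits _ (Int.natCast_nonneg _) (by exact_mod_cast (by omega :
          PySem.List.bisectRight (fruits.take i.toNat)
            [min (2 * PySem.List.pyGetD (PySem.List.pyGetD fruits i []) 0 0 - k - startPos) startPos, 0]
            ≤ fruits.length)),
        pvPref_get fruits i h0i (by omega)]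
    congr 2

theorem pvB_eq_canon (fruits : List (List Int)) (startPos k : Int) :
    maxTotalFruits_fails2_alt fruits startPos k = pvCanon fruits startPos k := by
  simp only [maxTotalFruits_fails2_alt]
  rw [PySem.List.max?_id_cons]
  simp only [Option.getD_some]
  rw [List.foldl_append, List.foldl_map, List.foldl_map]
  simp only [pvCanon]
  rw [PySem.List.foldl_congr_mem _ _
    (fun ans i =>
      max ans (pvSum fruits (i.toNat + PySem.List.bisectRight (fruits.drop i.toNat)
                  [max (2 * PySem.List.pyGetD (PySem.List.pyGetD fruits i []) 0 0 + k - startPos) startPos,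
                   100000])
                - pvSum fruits i.toNat)) 0 ?hcl]
  case hcl =>
    intro acc i hi
    obtain ⟨hli, his⟩ := PySem.List.mem_pyRange_one.mp hi
    have h0i : 0 ≤ i := le_trans (Int.natCast_nonneg _) hli
    congr 1
    rw [PySem.List.slice_toNat fruits h0i (Int.natCast_nonneg _)]
    rw [pvSum_window fruits i.toNat _]
    congr 2
    omega
  rw [PySem.List.foldl_congr_mem _ _
    (fun ans i =>
      max ans (pvSum fruits i.toNat
                - pvSum fruits (PySem.List.bisectRight (fruits.take i.toNat)
                    [min (2 * PySem.List.pyGetD (PySem.List.pyGetD fruits i []) 0 0 - k - startPos) startPos,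
                     0]))) _ ?hcr]
  case hcr =>
    intro acc i hi
    obtain ⟨hli, his⟩ := PySem.List.mem_pyRange_one.mp hi
    have h0i : 0 ≤ i := le_trans (Int.natCast_nonneg _) hli
    have hbt : PySem.List.bisectRight (fruits.take i.toNat)
        [min (2 * PySem.List.pyGetD (PySem.List.pyGetD fruits i []) 0 0 - k - startPos) startPos, 0]
        ≤ (fruits.take i.toNat).length := pvBisect_le_length _ _
    rw [List.length_take] at hbt
    congr 1
    rw [PySem.List.slice_toNat fruits (Int.natCast_nonneg _) h0i]
    rw [pvSum_window fruits _ _]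
    have hji : (((PySem.List.bisectRight (fruits.take i.toNat)
        [min (2 * PySem.List.pyGetD (PySem.List.pyGetD fruits i []) 0 0 - k - startPos) startPos, 0] : Nat) : Int)).toNat
        + (i.toNat - (((PySem.List.bisectRight (fruits.take i.toNat)
            [min (2 * PySem.List.pyGetD (PySem.List.pyGetD fruits i []) 0 0 - k - startPos) startPos, 0] : Nat) : Int)).toNat)
        = i.toNat := by omega
    rw [hji]
    congr 2

-- ===== VERDICT (by name: the statement is the Claim_ definition above) =====
theorem maxTotalFruits_fails2_spec : Claim_equal_maxTotalFruits_fails2 := by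
  intro fruits startPos k _hdom _hpre
  unfold Spec_maxTotalFruits_fails2
  rw [pvA_eq_canon fruits startPos k, pvB_eq_canon fruits startPos k]
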